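-- pv_equiv track=rewrite | github.com/pedropreto/codeadvent2021 | day8.py | is_contained
-- ===== SOURCE A (Python) =====
-- def is_contained(to_contain, contained):
--     boolean_list = []
--     for letter in contained:
--         if letter in to_contain:
--             boolean_list.append(True)
--         else:
--             boolean_list.append(False)
--     if all(boolean_list):
--         return True
--     else:
--         return False
-- ===== SOURCE B (Python) =====
-- def is_contained(to_contain, contained):
--     # Sorted-merge subset check: sort the distinct letters of each string,
--     # then walk both sorted lists in lockstep (merge style).
--     a = sorted(set(to_contain))
--     b = sorted(set(contained))
--     def merge(a, b):
--         if not b: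
--             return True
--         if not a:
--             return False
--         if a[0] < b[0]:
--             return merge(a[1:], b)
--         if a[0] == b[0]:
--             return merge(a[1:], b[1:])
--         return False
--     return merge(a, b)
-- ===== Notes on version B (the rewrite author's own statement) =====
-- stated objective: alternative
-- what changed: Replaces the per-letter membership loop with boolean accumulation by a sort-then-merge subset check: both strings are deduplicated and sorted, then a single lockstep merge recursion decides containment without any membership test.
import Mathlib
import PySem

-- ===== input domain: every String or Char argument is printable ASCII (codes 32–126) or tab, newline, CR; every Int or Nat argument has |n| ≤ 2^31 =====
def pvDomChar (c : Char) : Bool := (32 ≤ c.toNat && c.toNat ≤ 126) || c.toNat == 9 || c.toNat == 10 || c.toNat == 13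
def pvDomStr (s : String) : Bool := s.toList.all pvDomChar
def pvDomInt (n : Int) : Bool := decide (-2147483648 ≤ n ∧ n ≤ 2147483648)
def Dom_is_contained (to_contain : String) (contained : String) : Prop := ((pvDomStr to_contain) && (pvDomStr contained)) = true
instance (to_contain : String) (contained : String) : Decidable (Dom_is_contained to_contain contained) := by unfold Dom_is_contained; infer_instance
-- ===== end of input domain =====

-- B replaces A's per-letter membership loop and boolean list by sorting the distinct
-- letters of both strings and deciding containment with one lockstep merge (alternative).

-- ===== PORT A =====
def is_contained (to_contain : String) (contained : String) : Bool :=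
  let boolean_list := contained.toList.foldl
    (fun acc letter =>
      if to_contain.toList.contains letter then acc ++ [true] else acc ++ [false])
    []
  if boolean_list.all (fun b => b) then true else false

-- ===== PORT B =====
-- B's helper merge(a, b): lockstep walk over the two sorted lists.
def pvMerge : List Char → List Char → Bool
  | _, [] => true
  | [], _ :: _ => false
  | x :: xs, y :: ys =>
    if x < y then pvMerge xs (y :: ys)
    else if x = y then pvMerge xs ys
    else false

def is_contained_alt (to_contain : String) (contained : String) : Bool :=
  let a := PySem.List.sorted (PySem.Set.ofList to_contain.toList) (fun x => x) false
  let b := PySem.List.sorted (PySem.Set.ofList contained.toList) (fun x => x) false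
  pvMerge a b

-- ===== PRECONDITION & SPEC =====
def Spec_is_contained (to_contain : String) (contained : String) (out : Bool) : Prop := out = is_contained_alt to_contain contained
instance (to_contain : String) (contained : String) (out : Bool) : Decidable (Spec_is_contained to_contain contained out) := by unfold Spec_is_contained; infer_instance

-- ===== CLAIM =====
def Claim_equal_is_contained : Prop := ∀ (to_contain : String) (contained : String), Dom_is_contained to_contain contained → Spec_is_contained to_contain contained (is_contained to_contain contained)

-- ===== LEMMAS AND PROOFS =====

-- A's loop: the boolean list it builds, appended to any accumulator, is all-true iff
-- the accumulator is all-true and every letter of l is in t.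
theorem pv_foldl_all (t : List Char) (l : List Char) (acc : List Bool) :
    ((l.foldl (fun acc letter => if t.contains letter then acc ++ [true] else acc ++ [false]) acc).all (fun b => b))
      = (acc.all (fun b => b) && l.all (fun c => t.contains c)) := by
  induction l generalizing acc with
  | nil => simp
  | cons c cs ih =>
    rw [List.foldl_cons]
    by_cases h : t.contains c
    · have h' : c ∈ t := by simpa using h
      rw [if_pos h, ih, List.all_append]
      simp [h']
    · have h' : c ∉ t := by simpa using h
      rw [if_neg h, ih, List.all_append]
      simp [h']

-- B's merge on strictly increasing lists decides the subset relation.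
theorem pv_merge_iff (a b : List Char) (ha : a.Pairwise (· < ·)) (hb : b.Pairwise (· < ·)) :
    pvMerge a b = true ↔ ∀ y ∈ b, y ∈ a := by
  induction a generalizing b with
  | nil =>
    cases b with
    | nil => simp [pvMerge]
    | cons y ys =>
      apply iff_of_false
      · simp [pvMerge]
      · intro h
        exact absurd (h y List.mem_cons_self) (List.not_mem_nil)
  | cons x xs ih =>
    cases b with
    | nil => simp [pvMerge]
    | cons y ys =>
      rcases List.pairwise_cons.mp ha with ⟨hxall, hxs⟩
      rcases List.pairwise_cons.mp hb with ⟨hyall, hys⟩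
      simp only [pvMerge]
      by_cases h1 : x < y
      · rw [if_pos h1, ih (y :: ys) hxs hb]
        constructor
        · intro h z hz
          exact List.mem_cons_of_mem x (h z hz)
        · intro h z hz
          have hzx : x < z := by
            rcases List.mem_cons.mp hz with rfl | hz'
            · exact h1
            · exact lt_trans h1 (hyall z hz')
          rcases List.mem_cons.mp (h z hz) with rfl | hmem
          · exact absurd hzx (lt_irrefl z)
          · exact hmem
      · by_cases h2 : x = y
        · subst h2
          rw [if_neg h1, if_pos rfl, ih ys hxs hys]
          constructor
          · intro h z hz
            rcases List.mem_cons.mp hz with rfl | hz'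
            · exact List.mem_cons_self
            · exact List.mem_cons_of_mem x (h z hz')
          · intro h z hz
            have hzx : x < z := hyall z hz
            rcases List.mem_cons.mp (h z (List.mem_cons_of_mem x hz)) with rfl | hmem
            · exact absurd hzx (lt_irrefl z)
            · exact hmem
        · have hyx : y < x := lt_of_le_of_ne (not_lt.mp h1) (fun e => h2 e.symm)
          rw [if_neg h1, if_neg h2]
          apply iff_of_false
          · simp
          · intro h
            rcases List.mem_cons.mp (h y List.mem_cons_self) with rfl | hmem
            · exact absurd hyx (lt_irrefl y)
            · exact absurd hyx (not_lt.mpr (le_of_lt (hxall y hmem)))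

theorem is_contained_spec : Claim_equal_is_contained := by
  intro t c _
  unfold Spec_is_contained
  rw [Bool.eq_iff_iff]
  have hA : is_contained t c = true ↔ ∀ ch ∈ c.toList, ch ∈ t.toList := by
    simp only [is_contained]
    rw [pv_foldl_all]
    simp [List.all_eq_true]
  have hB : is_contained_alt t c = true ↔ ∀ ch ∈ c.toList, ch ∈ t.toList := by
    simp only [is_contained_alt]
    rw [pv_merge_iff _ _ (PySem.List.sorted_ofList_pairwise_lt _) (PySem.List.sorted_ofList_pairwise_lt _)]
    constructor
    · intro h ch hch
      have := h ch (by rw [PySem.List.mem_sorted, PySem.Set.mem_ofList]; exact hch)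
      rwa [PySem.List.mem_sorted, PySem.Set.mem_ofList] at this
    · intro h ch hch
      rw [PySem.List.mem_sorted, PySem.Set.mem_ofList] at hch
      rw [PySem.List.mem_sorted, PySem.Set.mem_ofList]
      exact h ch hch
  rw [hA, hB]
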